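-- pv_equiv track=rewrite | github.com/miliar/Code_Jam_Webscraper | solutions_python/solutions_year17_round0_nr3/590.py | find
-- ===== SOURCE A (Python) =====
-- def find(n, k):
--     if (k == 1):
--         return ((n-1)//2, (n-1)//2+((n-1)&1))
--     if (n & 1== 1):
--         return find(n//2, (k-1)//2+((k-1)&1))
--     else:
--         if (k & 1 == 1):
--             return find((n-1)//2, k//2)
--         else:
--             return find((n-1)//2 + 1, k//2)
--         '''return find((n-1)//2+((n-1)&1), (k-1)//2+((k-1)&1))'''
-- ===== SOURCE B (Python) =====
-- def find(n, k):
--     # Iterative: k simply halves each round (ceil((k-1)/2) == k//2), and the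
--     # three n-updates collapse to one expression.
--     for _ in range(k.bit_length() - 1):
--         n = n // 2 - (1 if n % 2 == 0 and k % 2 == 1 else 0)
--         k //= 2
--     h = (n - 1) // 2
--     return (h, h + (n - 1) % 2)
-- ===== Notes on version B (the rewrite author's own statement) =====
-- stated objective: simpler
-- what changed: Replaces the three-branch tail recursion by a plain loop over k's bit positions: k's update collapses to k //= 2 in every branch (ceil((k-1)/2) == k//2), and the three n-updates merge into the single expression n//2 - (1 if n even and k odd else 0).
import Mathlib
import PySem

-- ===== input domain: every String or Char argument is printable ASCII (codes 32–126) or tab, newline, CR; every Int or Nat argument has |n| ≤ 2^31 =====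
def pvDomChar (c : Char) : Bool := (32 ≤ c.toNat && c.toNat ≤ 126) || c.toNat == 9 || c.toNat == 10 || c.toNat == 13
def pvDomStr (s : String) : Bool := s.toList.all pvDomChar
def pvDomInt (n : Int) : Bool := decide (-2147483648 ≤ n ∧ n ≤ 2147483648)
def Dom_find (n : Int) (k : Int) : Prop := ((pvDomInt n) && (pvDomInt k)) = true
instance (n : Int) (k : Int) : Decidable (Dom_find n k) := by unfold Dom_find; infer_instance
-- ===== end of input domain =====

-- B replaces A's three-branch tail recursion by a loop over k's bit positions with the
-- branch updates merged into one expression (objective: simpler). Return values only; no mutation.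

-- ===== PORT A =====
-- A's recursion halves k each call; fuel bitLength k + 1 covers every k ≥ 1 (it never runs
-- out there, proved below); for k ≤ 0 Python recurses forever (outside Pre_find).
def findGo : Nat → Int → Int → Int × Int
  | 0, _, _ => (0, 0)  -- fuel exhausted: unreachable for k ≥ 1
  | f + 1, n, k =>
    if k = 1 then
      (PySem.Int.floordiv (n - 1) 2,
       PySem.Int.floordiv (n - 1) 2 + PySem.Int.band (n - 1) 1)
    else if PySem.Int.band n 1 = 1 then
      findGo f (PySem.Int.floordiv n 2)
               (PySem.Int.floordiv (k - 1) 2 + PySem.Int.band (k - 1) 1)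
    else if PySem.Int.band k 1 = 1 then
      findGo f (PySem.Int.floordiv (n - 1) 2) (PySem.Int.floordiv k 2)
    else
      findGo f (PySem.Int.floordiv (n - 1) 2 + 1) (PySem.Int.floordiv k 2)

def find (n : Int) (k : Int) : Int × Int := findGo (PySem.Int.bitLength k + 1) n k

-- ===== PORT B =====
-- 'for _ in range(k.bit_length() - 1)': the loop body, iterated that many times
def findAltGo : Nat → Int → Int → Int
  | 0, n, _ => n
  | c + 1, n, k =>
    findAltGo c
      (PySem.Int.floordiv n 2 -
        (if PySem.Int.mod n 2 = 0 ∧ PySem.Int.mod k 2 = 1 then 1 else 0))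
      (PySem.Int.floordiv k 2)

-- 'h = (n-1)//2; return (h, h + (n-1)%2)' after the loop
def findAltFinish (n' : Int) : Int × Int :=
  (PySem.Int.floordiv (n' - 1) 2,
   PySem.Int.floordiv (n' - 1) 2 + PySem.Int.mod (n' - 1) 2)

def find_alt (n : Int) (k : Int) : Int × Int :=
  findAltFinish (findAltGo (PySem.Int.bitLength k - 1) n k)  -- range(x) is empty for x ≤ 0, = Nat subtraction

-- ===== PRECONDITION & SPEC =====
-- Pre_find excludes k ≤ 0, on which Python A recurses forever (RecursionError).
def Pre_find (n : Int) (k : Int) : Prop := 1 ≤ k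
instance (n : Int) (k : Int) : Decidable (Pre_find n k) := by unfold Pre_find; infer_instance
def pvWitness_find : Int × Int := (10, 4)

def Spec_find (n : Int) (k : Int) (out : Int × Int) : Prop := out = find_alt n k
instance (n : Int) (k : Int) (out : Int × Int) : Decidable (Spec_find n k out) := by unfold Spec_find; infer_instance

-- ===== CLAIM (what is proved, stated in full; the proofs are below) =====
def Claim_equal_find : Prop := ∀ (n : Int) (k : Int), Dom_find n k → Pre_find n k → Spec_find n k (find n k)

-- ===== LEMMAS AND PROOFS =====

-- one-step equations (definitional)
lemma findGo_succ (f : Nat) (n k : Int) : findGo (f + 1) n k =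
    (if k = 1 then
      (PySem.Int.floordiv (n - 1) 2,
       PySem.Int.floordiv (n - 1) 2 + PySem.Int.band (n - 1) 1)
    else if PySem.Int.band n 1 = 1 then
      findGo f (PySem.Int.floordiv n 2)
               (PySem.Int.floordiv (k - 1) 2 + PySem.Int.band (k - 1) 1)
    else if PySem.Int.band k 1 = 1 then
      findGo f (PySem.Int.floordiv (n - 1) 2) (PySem.Int.floordiv k 2)
    else
      findGo f (PySem.Int.floordiv (n - 1) 2 + 1) (PySem.Int.floordiv k 2)) := rfl

lemma findAltGo_succ (c : Nat) (n k : Int) : findAltGo (c + 1) n k =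
    findAltGo c
      (PySem.Int.floordiv n 2 -
        (if PySem.Int.mod n 2 = 0 ∧ PySem.Int.mod k 2 = 1 then 1 else 0))
      (PySem.Int.floordiv k 2) := rfl

-- ceil((k-1)/2) = k // 2, for every integer k
lemma ceil_pred_half (k : Int) :
    PySem.Int.floordiv (k - 1) 2 + PySem.Int.mod (k - 1) 2 = PySem.Int.floordiv k 2 := by
  rw [PySem.Int.floordiv_eq_ediv_of_pos (a := k - 1) (b := 2) (by norm_num),
      PySem.Int.mod_eq_emod_of_pos (a := k - 1) (b := 2) (by norm_num),
      PySem.Int.floordiv_eq_ediv_of_pos (a := k) (b := 2) (by norm_num)]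
  omega

lemma bitLen_pos (k : Int) (hk : 1 ≤ k) : 1 ≤ PySem.Int.bitLength k := by
  have h := PySem.Int.lt_two_pow_bitLength k
  by_contra h'
  rw [Nat.lt_one_iff.mp (not_le.mp h')] at h
  simp at h
  omega

lemma halfGeOne (k : Int) (hk : 2 ≤ k) : 1 ≤ PySem.Int.floordiv k 2 := by
  rw [PySem.Int.floordiv_eq_ediv_of_pos (a := k) (b := 2) (by norm_num)]; omega

-- main induction: with enough fuel, A's recursion equals B's loop
lemma go_eq (f : Nat) : ∀ (n k : Int), 1 ≤ k → PySem.Int.bitLength k ≤ f →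
    findGo (f + 1) n k = find_alt n k := by
  induction f with
  | zero =>
    intro n k hk hf
    exact absurd (le_trans (bitLen_pos k hk) hf) (by omega)
  | succ f ih =>
    intro n k hk hf
    by_cases h1 : k = 1
    · subst h1
      rw [findGo_succ, if_pos rfl]
      simp [find_alt, findAltFinish, findAltGo, PySem.Int.band_one,
            show PySem.Int.bitLength (1 : Int) = 1 from by decide]
    · -- k ≥ 2: one unfolding on each side
      have hk2 : 2 ≤ k := by omega
      have hbl : PySem.Int.bitLength k = PySem.Int.bitLength (PySem.Int.floordiv k 2) + 1 :=
        PySem.Int.bitLength_of_pos (n := k) (by omega)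
      have hk' : 1 ≤ PySem.Int.floordiv k 2 := halfGeOne k hk2
      have hbl' : PySem.Int.bitLength (PySem.Int.floordiv k 2) ≤ f := by omega
      have hsteps : PySem.Int.bitLength k - 1 =
          (PySem.Int.bitLength (PySem.Int.floordiv k 2) - 1) + 1 := by
        have := bitLen_pos _ hk'; omega
      have hmodn := PySem.Int.mod_nonneg n (b := 2) (by norm_num)
      have hmodnlt := PySem.Int.mod_lt n (b := 2) (by norm_num)
      have hmodk := PySem.Int.mod_nonneg k (b := 2) (by norm_num)
      have hmodklt := PySem.Int.mod_lt k (b := 2) (by norm_num)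
      -- B's single loop step, as a function of the branch facts
      have hBstep : ∀ n₁ : Int,
          (PySem.Int.floordiv n 2 -
            (if PySem.Int.mod n 2 = 0 ∧ PySem.Int.mod k 2 = 1 then 1 else 0)) = n₁ →
          find_alt n k = find_alt n₁ (PySem.Int.floordiv k 2) := by
        intro n₁ hstep
        unfold find_alt
        rw [hsteps, findAltGo_succ, hstep]
      by_cases hn : PySem.Int.mod n 2 = 1
      · -- n odd: A's k-update ceil((k-1)/2) = k//2, n-update n//2 on both sides
        rw [findGo_succ, if_neg h1, PySem.Int.band_one n, hn, if_pos rfl,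
            PySem.Int.band_one (k - 1), ceil_pred_half k,
            ih _ _ hk' hbl',
            hBstep (PySem.Int.floordiv n 2) (by rw [if_neg (by omega)]; ring)]
      · have hn0 : PySem.Int.mod n 2 = 0 := by omega
        have harith0 : PySem.Int.floordiv (n - 1) 2 = PySem.Int.floordiv n 2 - 1 := by
          rw [PySem.Int.floordiv_eq_ediv_of_pos (a := n - 1) (b := 2) (by norm_num),
              PySem.Int.floordiv_eq_ediv_of_pos (a := n) (b := 2) (by norm_num)]
          rw [PySem.Int.mod_eq_emod_of_pos (a := n) (b := 2) (by norm_num)] at hn0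
          omega
        by_cases hkodd : PySem.Int.mod k 2 = 1
        · -- n even, k odd: (n-1)//2 = n//2 - 1
          rw [findGo_succ, if_neg h1, PySem.Int.band_one n, hn0, if_neg (by norm_num),
              PySem.Int.band_one k, hkodd, if_pos rfl, harith0,
              ih _ _ hk' hbl',
              hBstep (PySem.Int.floordiv n 2 - 1) (by rw [if_pos ⟨hn0, hkodd⟩])]
        · -- n even, k even: (n-1)//2 + 1 = n//2
          have hk0 : PySem.Int.mod k 2 = 0 := by omega
          rw [findGo_succ, if_neg h1, PySem.Int.band_one n, hn0, if_neg (by norm_num),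
              PySem.Int.band_one k, hk0, if_neg (by norm_num), harith0,
              show PySem.Int.floordiv n 2 - 1 + 1 = PySem.Int.floordiv n 2 from by ring,
              ih _ _ hk' hbl',
              hBstep (PySem.Int.floordiv n 2) (by rw [if_neg (by omega)]; ring)]

-- ===== VERDICT (by name: the statement is the Claim_ definition above) =====
theorem find_spec : Claim_equal_find := by
  intro n k _ hk
  show find n k = find_alt n k
  exact go_eq _ n k hk (Nat.le_refl _)
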